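-- pv_equiv track=rewrite | github.com/yamaton/advent-of-code | 2023/day04.py | day04b
-- ===== SOURCE A (Python) =====
-- from typing import List
--
-- def day04b(acc: List[int]) -> int:
--     """
--     >>> day04b([4, 2, 2, 1, 0, 0])
--     30
--     """
--     n = len(acc)
--     state = [1] * n
--     for i, win_num in enumerate(acc):
--         for j in range(win_num):
--             if i + j + 1 < n:
--                 state[i + j + 1] += state[i]
--     return sum(state)
-- ===== SOURCE B (Python) =====
-- from typing import List
--
-- def day04b(acc: List[int]) -> int:
--     """
--     >>> day04b([4, 2, 2, 1, 0, 0])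
--     30
--     """
--     n = len(acc)
--     diff = [0] * (n + 1)
--     add = 0
--     total = 0
--     for i, w in enumerate(acc):
--         add += diff[i]
--         s = 1 + add
--         total += s
--         lo = i + 1
--         hi = min(i + w, n - 1)
--         if lo <= hi:
--             diff[lo] += s
--             diff[hi + 1] -= s
--     return total
-- ===== Notes on version B (the rewrite author's own statement) =====
-- stated objective: faster
-- what changed: Replaced A's nested loop that increments each of the next win_num state entries per card (O(sum of win values)) by a single left-to-right pass over a difference array: each card posts one range update (+s at lo, -s past hi) and recovers its own count from the running prefix sum.
import Mathlib
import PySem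

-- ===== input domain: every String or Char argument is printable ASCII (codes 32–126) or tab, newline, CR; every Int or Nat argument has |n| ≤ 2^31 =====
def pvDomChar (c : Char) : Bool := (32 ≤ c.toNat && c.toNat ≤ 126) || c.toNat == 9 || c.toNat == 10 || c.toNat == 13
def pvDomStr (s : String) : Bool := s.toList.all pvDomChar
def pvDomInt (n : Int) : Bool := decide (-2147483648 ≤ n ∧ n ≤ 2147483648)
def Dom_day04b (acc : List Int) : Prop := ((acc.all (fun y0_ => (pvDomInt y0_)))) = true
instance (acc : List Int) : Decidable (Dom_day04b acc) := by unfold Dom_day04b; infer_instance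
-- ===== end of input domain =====

-- B replaces A's quadratic cascade of per-card increments by a one-pass difference-array
-- (prefix-sum range update) computation of the same totals.

-- ===== PORT A =====
def day04b (acc : List Int) : Int :=
  let n := acc.length
  let state := List.replicate n (1 : Int)
  let state := (PySem.List.enumerate acc 0).foldl
    (fun st p =>
      (PySem.List.pyRange 0 p.2 1).foldl
        (fun st j =>
          if p.1 + j + 1 < (n : Int) then
            PySem.List.pySetD st (p.1 + j + 1)
              (PySem.List.pyGetD st (p.1 + j + 1) 0 + PySem.List.pyGetD st p.1 0)
          else st) st) state
  state.sum

-- ===== PORT B =====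
def day04b_alt (acc : List Int) : Int :=
  let n := acc.length
  let res := (PySem.List.enumerate acc 0).foldl
    (fun (st : List Int × Int × Int) p =>
      let add := st.2.1 + PySem.List.pyGetD st.1 p.1 0
      let s := 1 + add
      let total := st.2.2 + s
      let lo := p.1 + 1
      let hi := min (p.1 + p.2) ((n : Int) - 1)
      let diff :=
        if lo ≤ hi then
          let d1 := PySem.List.pySetD st.1 lo (PySem.List.pyGetD st.1 lo 0 + s)
          PySem.List.pySetD d1 (hi + 1) (PySem.List.pyGetD d1 (hi + 1) 0 - s)
        else st.1
      (diff, add, total))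
    (List.replicate (n + 1) (0 : Int), 0, 0)
  res.2.2

-- ===== PRECONDITION & SPEC =====
def Spec_day04b (acc : List Int) (out : Int) : Prop := out = day04b_alt acc
instance (acc : List Int) (out : Int) : Decidable (Spec_day04b acc out) := by unfold Spec_day04b; infer_instance

-- ===== CLAIM (what is proved, stated in full; the proofs are below) =====
def Claim_equal_day04b : Prop := ∀ (acc : List Int), Dom_day04b acc → Spec_day04b acc (day04b acc)

-- ===== LEMMAS AND PROOFS =====

-- F acc i = final number of copies of card i (the common mathematical value both programs compute)
def pvF (acc : List Int) (i : Nat) : Int :=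
  1 + ((List.range i).attach.map (fun k =>
    if (i : Int) ≤ (k.1 : Int) + acc.getD k.1 0 then pvF acc k.1 else 0)).sum
termination_by i
decreasing_by exact List.mem_range.mp k.2

-- G acc m t = contribution of the first m cards to card t's count
def pvG (acc : List Int) (m t : Nat) : Int :=
  ((List.range m).map (fun k =>
    if k < t ∧ (t : Int) ≤ (k : Int) + acc.getD k 0 then pvF acc k else 0)).sum

lemma pvG_zero (acc : List Int) (t : Nat) : pvG acc 0 t = 0 := by
  simp [pvG]

lemma pvG_succ (acc : List Int) (m t : Nat) :
    pvG acc (m + 1) t = pvG acc m t +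
      (if m < t ∧ (t : Int) ≤ (m : Int) + acc.getD m 0 then pvF acc m else 0) := by
  simp [pvG, List.range_succ]


lemma pvF_eq (acc : List Int) (m : Nat) : pvF acc m = 1 + pvG acc m m := by
  rw [pvF]
  congr 1
  simp only [List.map_attach_eq_pmap, List.pmap_eq_map]
  unfold pvG
  apply congrArg List.sum
  apply List.map_congr_left
  intro k hk
  have hkm : k < m := List.mem_range.mp hk
  exact if_congr (Iff.intro (fun h => ⟨hkm, h⟩) (fun h => h.2)) rfl rfl

lemma pvG_stable (acc : List Int) (t m : Nat) (h : t ≤ m) : pvG acc m t = pvG acc t t := by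
  induction m with
  | zero => have : t = 0 := by omega
            subst this; rfl
  | succ m ih =>
    rcases Nat.lt_or_ge t (m + 1) with h' | h'
    · have ht : t ≤ m := by omega
      rw [pvG_succ, ih ht, if_neg (by omega), add_zero]
    · have : t = m + 1 := by omega
      subst this; rfl

lemma getD_set' (xs : List Int) (p : Nat) (v : Int) (hp : p < xs.length) (t : Nat) :
    (xs.set p v).getD t 0 = if t = p then v else xs.getD t 0 := by
  rcases lt_or_ge t xs.length with h | h
  · rw [List.getD_eq_getElem _ _ (by simpa using h), List.getD_eq_getElem _ _ h, List.getElem_set]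
    split_ifs with h1 h2 h3 <;> first | rfl | omega
  · rw [List.getD_eq_default _ _ (by simpa using h), List.getD_eq_default _ _ h]
    rw [if_neg (by omega)]

-- the effect of A's inner loop over range(w) (as a fold over List.range m, m = w.toNat)
lemma innerAux (acc : List Int) (i : Nat) (hi : i < acc.length) :
    ∀ (m : Nat) (st : List Int), st.length = acc.length →
    (((List.range m).foldl
      (fun st (k : Nat) =>
        if (i : Int) + (k : Int) + 1 < (acc.length : Int) then
          PySem.List.pySetD st ((i : Int) + (k : Int) + 1)
            (PySem.List.pyGetD st ((i : Int) + (k : Int) + 1) 0 + PySem.List.pyGetD st (i : Int) 0)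
        else st) st).length = acc.length ∧
     ∀ t : Nat, ((List.range m).foldl
      (fun st (k : Nat) =>
        if (i : Int) + (k : Int) + 1 < (acc.length : Int) then
          PySem.List.pySetD st ((i : Int) + (k : Int) + 1)
            (PySem.List.pyGetD st ((i : Int) + (k : Int) + 1) 0 + PySem.List.pyGetD st (i : Int) 0)
        else st) st).getD t 0 =
      st.getD t 0 + (if i < t ∧ t ≤ i + m ∧ t < acc.length then st.getD i 0 else 0)) := by
  intro m
  induction m with
  | zero =>
    intro st hlen
    refine ⟨hlen, fun t => ?_⟩
    rw [if_neg (by omega)]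
    simp
  | succ m ih =>
    intro st hlen
    obtain ⟨ihlen, ihget⟩ := ih st hlen
    rw [List.range_succ, List.foldl_append, List.foldl_cons, List.foldl_nil]
    have hget_i := ihget i
    rw [if_neg (by omega)] at hget_i
    by_cases hc : (i : Int) + (m : Int) + 1 < (acc.length : Int)
    · rw [if_pos hc]
      have hcast : (i : Int) + (m : Int) + 1 = ((i + m + 1 : Nat) : Int) := by push_cast; ring
      rw [hcast, PySem.List.pySetD_natCast, PySem.List.pyGetD_natCast, PySem.List.pyGetD_natCast]
      have hn : i + m + 1 < acc.length := by omega
      refine ⟨by rw [List.length_set]; exact ihlen, fun t => ?_⟩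
      rw [getD_set' _ _ _ (by rw [ihlen]; exact hn) t]
      rcases eq_or_ne t (i + m + 1) with rfl | hne
      · rw [if_pos rfl, ihget (i + m + 1), hget_i, if_neg (by omega),
          if_pos (show i < i + m + 1 ∧ i + m + 1 ≤ i + (m + 1) ∧ i + m + 1 < acc.length by omega)]
        ring
      · rw [if_neg hne, ihget t]
        have hiff : (i < t ∧ t ≤ i + m ∧ t < acc.length) ↔
            (i < t ∧ t ≤ i + (m + 1) ∧ t < acc.length) := by omega
        rw [if_congr hiff rfl rfl]
    · rw [if_neg hc]
      refine ⟨ihlen, fun t => ?_⟩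
      rw [ihget t]
      have hiff : (i < t ∧ t ≤ i + m ∧ t < acc.length) ↔
          (i < t ∧ t ≤ i + (m + 1) ∧ t < acc.length) := by omega
      rw [if_congr hiff rfl rfl]

-- the inner loop in port-A shape (fold over pyRange 0 w 1)
lemma innerA (acc : List Int) (i : Nat) (hi : i < acc.length) (wv : Int)
    (st : List Int) (hlen : st.length = acc.length) :
    (((PySem.List.pyRange 0 wv 1).foldl
      (fun st j =>
        if (i : Int) + j + 1 < (acc.length : Int) then
          PySem.List.pySetD st ((i : Int) + j + 1)
            (PySem.List.pyGetD st ((i : Int) + j + 1) 0 + PySem.List.pyGetD st (i : Int) 0)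
        else st) st).length = acc.length ∧
     ∀ t : Nat, ((PySem.List.pyRange 0 wv 1).foldl
      (fun st j =>
        if (i : Int) + j + 1 < (acc.length : Int) then
          PySem.List.pySetD st ((i : Int) + j + 1)
            (PySem.List.pyGetD st ((i : Int) + j + 1) 0 + PySem.List.pyGetD st (i : Int) 0)
        else st) st).getD t 0 =
      st.getD t 0 + (if i < t ∧ (t : Int) ≤ (i : Int) + wv ∧ t < acc.length then st.getD i 0 else 0)) := by
  rw [PySem.List.pyRange_one]
  simp only [List.foldl_map, zero_add, Int.sub_zero]
  obtain ⟨hlen', hget⟩ := innerAux acc i hi wv.toNat st hlen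
  refine ⟨hlen', fun t => ?_⟩
  rw [hget t]
  have hiff : (i < t ∧ t ≤ i + wv.toNat ∧ t < acc.length) ↔
      (i < t ∧ (t : Int) ≤ (i : Int) + wv ∧ t < acc.length) := by omega
  rw [if_congr hiff rfl rfl]

-- A's state after the first m outer iterations
def pvStA (acc : List Int) (m : Nat) : List Int :=
  ((PySem.List.enumerate acc 0).take m).foldl
    (fun st p =>
      (PySem.List.pyRange 0 p.2 1).foldl
        (fun st j =>
          if p.1 + j + 1 < (acc.length : Int) then
            PySem.List.pySetD st (p.1 + j + 1)
              (PySem.List.pyGetD st (p.1 + j + 1) 0 + PySem.List.pyGetD st p.1 0)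
          else st) st) (List.replicate acc.length (1 : Int))

lemma pvStA_succ (acc : List Int) (m : Nat) (hm : m < acc.length) :
    pvStA acc (m + 1) =
      (PySem.List.pyRange 0 (acc.getD m 0) 1).foldl
        (fun st j =>
          if (m : Int) + j + 1 < (acc.length : Int) then
            PySem.List.pySetD st ((m : Int) + j + 1)
              (PySem.List.pyGetD st ((m : Int) + j + 1) 0 + PySem.List.pyGetD st (m : Int) 0)
          else st) (pvStA acc m) := by
  unfold pvStA
  rw [List.take_succ, PySem.List.getElem?_enumerate]
  rw [List.getElem?_eq_getElem hm]
  simp only [Option.map_some, Option.toList_some, List.foldl_append, List.foldl_cons,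
    List.foldl_nil, zero_add, List.getD_eq_getElem acc 0 hm]

lemma pvA_inv (acc : List Int) : ∀ m, m ≤ acc.length →
    (pvStA acc m).length = acc.length ∧
    ∀ t : Nat, (pvStA acc m).getD t 0 = if t < acc.length then 1 + pvG acc m t else 0 := by
  intro m
  induction m with
  | zero =>
    intro _
    refine ⟨by simp [pvStA], fun t => ?_⟩
    rcases lt_or_ge t acc.length with h | h
    · rw [if_pos h, pvG_zero]
      simp [pvStA, List.getD, List.getElem?_replicate, h]
    · rw [if_neg (by omega)]
      simp [pvStA, List.getD, List.getElem?_replicate, Nat.not_lt.mpr h]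
  | succ m ih =>
    intro hm
    obtain ⟨ihlen, ihget⟩ := ih (by omega)
    rw [pvStA_succ acc m (by omega)]
    obtain ⟨hlen', hget⟩ := innerA acc m (by omega) (acc.getD m 0) (pvStA acc m) ihlen
    refine ⟨hlen', fun t => ?_⟩
    rw [hget t, ihget t, ihget m, if_pos (show m < acc.length by omega)]
    have hFm : 1 + pvG acc m m = pvF acc m := (pvF_eq acc m).symm
    rcases lt_or_ge t acc.length with h | h
    · rw [if_pos h, if_pos h, pvG_succ]
      have hsplit : (m < t ∧ (t : Int) ≤ (m : Int) + acc.getD m 0 ∧ t < acc.length) ↔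
          (m < t ∧ (t : Int) ≤ (m : Int) + acc.getD m 0) := by
        constructor
        · rintro ⟨a, b, _⟩; exact ⟨a, b⟩
        · rintro ⟨a, b⟩; exact ⟨a, b, h⟩
      rw [if_congr hsplit rfl rfl, hFm]
      split_ifs <;> ring
    · rw [if_neg (show ¬ (m < t ∧ (t : Int) ≤ (m : Int) + acc.getD m 0 ∧ t < acc.length) by omega),
        add_zero]
      rw [if_neg (by omega), if_neg (by omega)]

-- sum of a list as a sum over indices
lemma sum_eq_range_getD (l : List Int) :
    l.sum = ((List.range l.length).map (fun t => l.getD t 0)).sum := by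
  congr 1
  apply List.ext_getElem (by simp)
  intro t h1 h2
  simp only [List.getElem_map, List.getElem_range]
  exact (List.getD_eq_getElem l 0 h1).symm

lemma dayA_eq_sumF (acc : List Int) :
    day04b acc = ((List.range acc.length).map (fun t => pvF acc t)).sum := by
  have hfull : day04b acc = (pvStA acc acc.length).sum := by
    unfold day04b pvStA
    rw [List.take_of_length_le (by rw [PySem.List.length_enumerate])]
  obtain ⟨hlen, hget⟩ := pvA_inv acc acc.length (le_refl _)
  rw [hfull, sum_eq_range_getD, hlen]
  apply congrArg List.sum
  apply List.map_congr_left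
  intro t ht
  have ht' : t < acc.length := List.mem_range.mp ht
  rw [hget t, if_pos ht', pvG_stable acc t acc.length (le_of_lt ht'), ← pvF_eq]

-- prefix sums of the difference array
def pvPref (d : List Int) (i : Nat) : Int := ((List.range i).map (fun j => d.getD j 0)).sum

lemma pvPref_succ (d : List Int) (i : Nat) : pvPref d (i + 1) = pvPref d i + d.getD i 0 := by
  simp [pvPref, List.range_succ]

lemma pvPref_set (d : List Int) (p : Nat) (v : Int) (hp : p < d.length) (i : Nat) :
    pvPref (d.set p v) i = pvPref d i + (if p < i then v - d.getD p 0 else 0) := by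
  induction i with
  | zero => simp [pvPref]
  | succ i ih =>
    rw [pvPref_succ, pvPref_succ, ih, getD_set' d p v hp i]
    by_cases h1 : i = p
    · subst h1
      rw [if_pos rfl, if_neg (lt_irrefl i), if_pos (Nat.lt_succ_self i)]
      ring
    · rw [if_neg h1]
      by_cases h2 : p < i
      · rw [if_pos h2, if_pos (by omega)]
        ring
      · rw [if_neg h2, if_neg (by omega)]
        ring

lemma getD_replicate_zero (k j : Nat) : (List.replicate k (0 : Int)).getD j 0 = 0 := by
  rcases lt_or_ge j k with h | h
  · rw [List.getD_eq_getElem _ _ (by simpa using h), List.getElem_replicate]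
  · rw [List.getD_eq_default _ _ (by simpa using h)]

lemma pvPref_replicate_zero (k i : Nat) : pvPref (List.replicate k (0 : Int)) i = 0 := by
  induction i with
  | zero => rfl
  | succ i ih => rw [pvPref_succ, ih, getD_replicate_zero, add_zero]

-- B's state after the first m iterations
def pvStB (acc : List Int) (m : Nat) : List Int × Int × Int :=
  ((PySem.List.enumerate acc 0).take m).foldl
    (fun (st : List Int × Int × Int) p =>
      let add := st.2.1 + PySem.List.pyGetD st.1 p.1 0
      let s := 1 + add
      let total := st.2.2 + s
      let lo := p.1 + 1
      let hi := min (p.1 + p.2) ((acc.length : Int) - 1)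
      let diff :=
        if lo ≤ hi then
          let d1 := PySem.List.pySetD st.1 lo (PySem.List.pyGetD st.1 lo 0 + s)
          PySem.List.pySetD d1 (hi + 1) (PySem.List.pyGetD d1 (hi + 1) 0 - s)
        else st.1
      (diff, add, total))
    (List.replicate (acc.length + 1) (0 : Int), 0, 0)

lemma pvStB_succ (acc : List Int) (m : Nat) (hm : m < acc.length) :
    pvStB acc (m + 1) =
      (let st := pvStB acc m
       let add := st.2.1 + PySem.List.pyGetD st.1 (m : Int) 0
       let s := 1 + add
       let total := st.2.2 + s
       let lo := (m : Int) + 1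
       let hi := min ((m : Int) + acc.getD m 0) ((acc.length : Int) - 1)
       let diff :=
         if lo ≤ hi then
           let d1 := PySem.List.pySetD st.1 lo (PySem.List.pyGetD st.1 lo 0 + s)
           PySem.List.pySetD d1 (hi + 1) (PySem.List.pyGetD d1 (hi + 1) 0 - s)
         else st.1
       (diff, add, total)) := by
  unfold pvStB
  rw [List.take_succ, PySem.List.getElem?_enumerate]
  rw [List.getElem?_eq_getElem hm]
  simp only [Option.map_some, Option.toList_some, List.foldl_append, List.foldl_cons,
    List.foldl_nil, zero_add, List.getD_eq_getElem acc 0 hm]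

lemma pvB_inv (acc : List Int) : ∀ m, m ≤ acc.length →
    (pvStB acc m).1.length = acc.length + 1 ∧
    (pvStB acc m).2.1 = pvPref (pvStB acc m).1 m ∧
    (pvStB acc m).2.2 = ((List.range m).map (fun k => pvF acc k)).sum ∧
    ∀ i : Nat, m ≤ i → i < acc.length → pvPref (pvStB acc m).1 (i + 1) = pvG acc m i := by
  intro m
  induction m with
  | zero =>
    intro _
    refine ⟨by simp [pvStB], by simp [pvStB, pvPref], by simp [pvStB], fun i _ _ => ?_⟩
    show pvPref (List.replicate (acc.length + 1) (0 : Int)) (i + 1) = pvG acc 0 i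
    rw [pvPref_replicate_zero, pvG_zero]
  | succ m ih =>
    intro hm
    obtain ⟨ihlen, ihadd, ihtot, ihinv⟩ := ih (by omega)
    rw [pvStB_succ acc m (by omega)]
    simp only [PySem.List.pyGetD_natCast]
    have hmn : m < acc.length := by omega
    have hs : (pvStB acc m).2.1 + (pvStB acc m).1.getD m 0 = pvG acc m m := by
      rw [ihadd, ← pvPref_succ]
      exact ihinv m (le_refl m) hmn
    have hsF : 1 + ((pvStB acc m).2.1 + (pvStB acc m).1.getD m 0) = pvF acc m := by
      rw [hs, ← pvF_eq]
    by_cases hc : (m : Int) + 1 ≤ min ((m : Int) + acc.getD m 0) ((acc.length : Int) - 1)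
    · simp only [if_pos hc]
      have hcastlo : (m : Int) + 1 = ((m + 1 : Nat) : Int) := by push_cast; ring
      have hcasthi : min ((m : Int) + acc.getD m 0) ((acc.length : Int) - 1) + 1 =
          (((min ((m : Int) + acc.getD m 0) ((acc.length : Int) - 1)).toNat + 1 : Nat) : Int) := by
        omega
      rw [hcastlo, hcasthi]
      rw [PySem.List.pySetD_natCast, PySem.List.pySetD_natCast,
        PySem.List.pyGetD_natCast, PySem.List.pyGetD_natCast]
      set q := (min ((m : Int) + acc.getD m 0) ((acc.length : Int) - 1)).toNat + 1 with hq
      have hqbound : q ≤ acc.length := by omega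
      have hqlow : m + 2 ≤ q := by omega
      have hplen : m + 1 < (pvStB acc m).1.length := by omega
      refine ⟨?_, ?_, ?_, ?_⟩
      · simp only [List.length_set]; exact ihlen
      · rw [pvPref_set _ _ _ (by rw [List.length_set]; omega),
          pvPref_set _ _ _ hplen, if_neg (show ¬ q < m + 1 by omega),
          if_neg (show ¬ m + 1 < m + 1 by omega)]
        rw [ihadd, ← pvPref_succ]
        ring
      · rw [List.range_succ, List.map_append, List.sum_append, ← ihtot]
        simp only [List.map_cons, List.map_nil, List.sum_cons, List.sum_nil]
        rw [← hsF]
        ring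
      · intro i hi hin
        have hq' : (q : Int) = min ((m : Int) + acc.getD m 0) ((acc.length : Int) - 1) + 1 :=
          hcasthi.symm
        rw [pvPref_set _ _ _ (by rw [List.length_set]; omega),
          pvPref_set _ _ _ hplen,
          if_pos (show m + 1 < i + 1 by omega),
          getD_set' _ _ _ hplen q,
          if_neg (show ¬ q = m + 1 by omega),
          ihinv i (by omega) hin, pvG_succ]
        by_cases hqi : q < i + 1
        · rw [if_pos hqi, if_neg (show ¬ (m < i ∧ (i : Int) ≤ (m : Int) + acc.getD m 0) by omega)]
          ring
        · rw [if_neg hqi, if_pos (show m < i ∧ (i : Int) ≤ (m : Int) + acc.getD m 0 by omega),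
            ← hsF]
          ring
    · simp only [if_neg hc]
      refine ⟨ihlen, ?_, ?_, ?_⟩
      · rw [ihadd, ← pvPref_succ]
      · rw [List.range_succ, List.map_append, List.sum_append, ← ihtot]
        simp only [List.map_cons, List.map_nil, List.sum_cons, List.sum_nil]
        rw [← hsF]
        ring
      · intro i hi hin
        rw [ihinv i (by omega) hin, pvG_succ, if_neg (by omega), add_zero]

lemma dayB_eq_sumF (acc : List Int) :
    day04b_alt acc = ((List.range acc.length).map (fun k => pvF acc k)).sum := by
  have hfull : day04b_alt acc = (pvStB acc acc.length).2.2 := by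
    unfold day04b_alt pvStB
    rw [List.take_of_length_le (by rw [PySem.List.length_enumerate])]
  rw [hfull, (pvB_inv acc acc.length (le_refl _)).2.2.1]

theorem day04b_spec : Claim_equal_day04b := by
  intro acc _
  unfold Spec_day04b
  rw [dayA_eq_sumF, dayB_eq_sumF]
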